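-- pv_equiv track=rewrite | github.com/suchenyang0910-glitch/usdt_telegram_membership | tools/env_sync_mysql.py | _set_line
-- ===== SOURCE A (Python) =====
-- def _set_line(lines: list[str], key: str, value: str) -> tuple[list[str], bool]:
--     updated = False
--     out: list[str] = []
--     found = False
--     for raw in lines:
--         line = raw.strip()
--         if not line or line.startswith("#") or "=" not in line:
--             out.append(raw)
--             continue
--         k, _ = line.split("=", 1)
--         k = (k or "").strip()
--         if k != key:
--             out.append(raw)
--             continue
--         if not found:
--             out.append(f"{key}={value}")
--             found = True
--             updated = True
--         else:
--             updated = True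
--             continue
--     if not found:
--         out.append(f"{key}={value}")
--         updated = True
--     return out, updated
-- ===== SOURCE B (Python) =====
-- def _key_of(raw: str):
--     line = raw.strip()
--     if not line or line.startswith("#") or "=" not in line:
--         return None
--     return line.split("=", 1)[0].strip()
--
--
-- def _set_line(lines: list[str], key: str, value: str) -> tuple[list[str], bool]:
--     new = f"{key}={value}"
--     for i, raw in enumerate(lines):
--         if _key_of(raw) == key:
--             return lines[:i] + [new] + [r for r in lines[i + 1:] if _key_of(r) != key], True
--     return lines + [new], True
-- ===== Notes on version B (the rewrite author's own statement) =====
-- stated objective: simpler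
-- what changed: A's single pass carrying updated/out/found flags is replaced by a find-first-matching-line loop that returns prefix + new line + a filtered suffix (later duplicates dropped), with line parsing factored into a _key_of helper.
import Mathlib
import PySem

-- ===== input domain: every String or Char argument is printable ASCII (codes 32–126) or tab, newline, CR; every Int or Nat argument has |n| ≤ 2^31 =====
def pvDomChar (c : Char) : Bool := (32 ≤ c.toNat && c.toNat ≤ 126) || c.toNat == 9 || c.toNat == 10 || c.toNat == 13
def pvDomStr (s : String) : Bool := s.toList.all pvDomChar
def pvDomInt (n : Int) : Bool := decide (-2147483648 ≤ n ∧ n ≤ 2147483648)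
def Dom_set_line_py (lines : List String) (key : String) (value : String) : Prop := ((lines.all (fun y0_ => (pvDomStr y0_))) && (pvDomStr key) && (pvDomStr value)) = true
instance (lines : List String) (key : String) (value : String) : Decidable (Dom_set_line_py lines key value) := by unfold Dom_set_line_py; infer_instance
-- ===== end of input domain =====

-- B replaces A's flag-carrying accumulation loop by find-first-match then splice (prefix ++ new line ++ filtered suffix); same values, simpler shape.

-- ===== PORT A =====
-- literal transliteration of A's loop: state (updated, out, found), per-line parse inline
def aBody (key newl : String) (st : Bool × List String × Bool) (raw : String) : Bool × List String × Bool :=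
  let (updated, out, found) := st
  let line := PySem.Str.strip raw
  if line == "" || PySem.Str.startswith line "#" || !PySem.Str.isIn "=" line then
    (updated, out ++ [raw], found)
  else
    -- k, _ = line.split("=", 1); the guard above ensures two parts, so parts[0] = headD ""
    let k0 := ((PySem.Str.splitMax? line "=" 1).getD []).headD ""
    let k := PySem.Str.strip (if k0 == "" then "" else k0)   -- (k or "").strip()
    if !(k == key) then (updated, out ++ [raw], found)
    else if !found then (true, out ++ [newl], true)
    else (true, out, found)

def set_line_py (lines : List String) (key : String) (value : String) : List String × Bool :=
  let updated := false
  let out : List String := []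
  let found := false
  let st := lines.foldl (aBody key (key ++ "=" ++ value)) (updated, out, found)
  let (updated, out, found) := st
  if !found then (out ++ [key ++ "=" ++ value], true) else (out, updated)

-- ===== PORT B =====
-- _key_of: parsed key of a config line, none for blank/comment/no-'=' lines
def keyOf (raw : String) : Option String :=
  let line := PySem.Str.strip raw
  if line == "" || PySem.Str.startswith line "#" || !PySem.Str.isIn "=" line then none
  else some (PySem.Str.strip (((PySem.Str.splitMax? line "=" 1).getD []).headD ""))

-- B's for-loop over enumerate(lines) with early return; slices index the whole list
def altGo (lines : List String) (key newl : String) : List (Int × String) → List String × Bool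
  | [] => (lines ++ [newl], true)
  | (i, raw) :: rest =>
    if keyOf raw == some key then
      (PySem.List.slice lines none (some i) ++ [newl] ++
        (PySem.List.slice lines (some (i + 1)) none).filter (fun r => !(keyOf r == some key)), true)
    else altGo lines key newl rest

def set_line_py_alt (lines : List String) (key : String) (value : String) : List String × Bool :=
  altGo lines key (key ++ "=" ++ value) (PySem.List.enumerate lines 0)

-- ===== PRECONDITION & SPEC =====
def Spec_set_line_py (lines : List String) (key : String) (value : String) (out : List String × Bool) : Prop := out = set_line_py_alt lines key value
instance (lines : List String) (key : String) (value : String) (out : List String × Bool) : Decidable (Spec_set_line_py lines key value out) := by unfold Spec_set_line_py; infer_instance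

-- ===== CLAIM (what is proved, stated in full; the proofs are below) =====
def Claim_equal_set_line_py : Prop := ∀ (lines : List String) (key : String) (value : String), Dom_set_line_py lines key value → Spec_set_line_py lines key value (set_line_py lines key value)

-- ===== LEMMAS AND PROOFS =====

-- the common clean form both ports reduce to
def specFn (key newl : String) : List String → List String × Bool
  | [] => ([newl], true)
  | x :: rest =>
    if keyOf x == some key then (newl :: rest.filter (fun r => !(keyOf r == some key)), true)
    else (x :: (specFn key newl rest).1, true)

theorem aBody_eq (key newl : String) (st : Bool × List String × Bool) (raw : String) :
    aBody key newl st raw =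
      if keyOf raw == some key then
        (if !st.2.2 then (true, st.2.1 ++ [newl], true) else (true, st.2.1, st.2.2))
      else (st.1, st.2.1 ++ [raw], st.2.2) := by
  obtain ⟨u, out, f⟩ := st
  simp only [aBody, keyOf]
  by_cases hg : (PySem.Str.strip raw == "" || PySem.Str.startswith (PySem.Str.strip raw) "#" || !PySem.Str.isIn "=" (PySem.Str.strip raw)) = true
  · simp only [hg]; simp
  · have hgf : (PySem.Str.strip raw == "" || PySem.Str.startswith (PySem.Str.strip raw) "#" || !PySem.Str.isIn "=" (PySem.Str.strip raw)) = false := by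
      simpa using hg
    simp only [hgf, Bool.false_eq_true, if_false]
    have hk : (if (((PySem.Str.splitMax? (PySem.Str.strip raw) "=" 1).getD []).headD "") == "" then "" else (((PySem.Str.splitMax? (PySem.Str.strip raw) "=" 1).getD []).headD "")) = (((PySem.Str.splitMax? (PySem.Str.strip raw) "=" 1).getD []).headD "") := by
      split_ifs with h0
      · exact (eq_of_beq h0).symm
      · rfl
    rw [hk]
    by_cases hkk : (PySem.Str.strip (((PySem.Str.splitMax? (PySem.Str.strip raw) "=" 1).getD []).headD "") == key) = true
    · simp only [hkk]
      simp only [List.headD_eq_head?_getD] at hkk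
      simp [eq_of_beq hkk]
    · have hkf : (PySem.Str.strip (((PySem.Str.splitMax? (PySem.Str.strip raw) "=" 1).getD []).headD "") == key) = false := by
        simpa using hkk
      simp only [hkf]
      simp only [List.headD_eq_head?_getD] at hkf
      simp
      intro he
      rw [he] at hkf
      simp at hkf

-- once found, the loop only filters out further matches
theorem foldl_found (key newl : String) (out : List String) :
    ∀ l : List String, l.foldl (aBody key newl) (true, out, true) =
      (true, out ++ l.filter (fun r => !(keyOf r == some key)), true) := by
  intro l
  induction l generalizing out with
  | nil => simp
  | cons x xs ih =>
    rw [List.foldl_cons, aBody_eq]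
    by_cases h : (keyOf x == some key) = true
    · simp [h, ih]
    · simp only [Bool.not_eq_true] at h
      simp [h, ih]

-- A's fold from a not-found state, then the epilogue, = specFn with the accumulator prefixed
theorem foldl_notfound (key newl : String) (u : Bool) (out : List String) :
    ∀ l : List String,
      (let st := l.foldl (aBody key newl) (u, out, false)
       if !st.2.2 then (st.2.1 ++ [newl], true) else (st.2.1, st.1)) =
      (out ++ (specFn key newl l).1, true) := by
  intro l
  induction l generalizing u out with
  | nil => simp [specFn]
  | cons x xs ih =>
    rw [List.foldl_cons, aBody_eq]
    by_cases h : (keyOf x == some key) = true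
    · simp only [h, if_pos, Bool.not_false]
      rw [foldl_found]
      simp [specFn, h]
    · simp only [Bool.not_eq_true] at h
      simp only [h, Bool.false_eq_true, if_false]
      have := ih u (out ++ [x])
      simp only at this
      rw [this]
      simp [specFn, h]

theorem a_eq (lines : List String) (key : String) (value : String) :
    set_line_py lines key value = ((specFn key (key ++ "=" ++ value) lines).1, true) := by
  have h := foldl_notfound key (key ++ "=" ++ value) false [] lines
  simp only at h
  simpa [set_line_py] using h

-- B = specFn, generalized over the already-scanned prefix
theorem altGo_eq (key newl : String) :
    ∀ (rest p : List String),
      altGo (p ++ rest) key newl (PySem.List.enumerate rest (p.length : Int)) =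
        (p ++ (specFn key newl rest).1, true) := by
  intro rest
  induction rest with
  | nil => intro p; simp [altGo, specFn, PySem.List.enumerate]
  | cons x xs ih =>
    intro p
    rw [PySem.List.enumerate_cons]
    simp only [altGo]
    by_cases h : (keyOf x == some key) = true
    · simp only [h, if_pos]
      rw [PySem.List.slice_to_natCast]
      have h1 : ((p.length : Int) + 1) = (((p ++ [x]).length : Nat) : Int) := by
        simp
      rw [h1, PySem.List.slice_from_natCast]
      have ht : (p ++ x :: xs).take p.length = p := by
        rw [show p ++ x :: xs = p ++ (x :: xs) from rfl, List.take_left]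
      have hd : (p ++ x :: xs).drop (p ++ [x]).length = xs := by
        rw [show p ++ x :: xs = (p ++ [x]) ++ xs by simp, List.drop_left]
      rw [ht, hd]
      simp [specFn, h]
    · simp only [Bool.not_eq_true] at h
      simp only [h, Bool.false_eq_true, if_false]
      have h1 : ((p.length : Int) + 1) = (((p ++ [x]).length : Nat) : Int) := by
        simp
      rw [h1]
      have := ih (p ++ [x])
      rw [List.append_assoc] at this
      simp only [List.singleton_append] at this
      rw [this]
      simp [specFn, h]

theorem b_eq (lines : List String) (key : String) (value : String) :
    set_line_py_alt lines key value = ((specFn key (key ++ "=" ++ value) lines).1, true) := by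
  have := altGo_eq key (key ++ "=" ++ value) lines []
  simpa [set_line_py_alt] using this

-- ===== VERDICT (by name: the statement is the Claim_ definition above) =====
theorem set_line_py_spec : Claim_equal_set_line_py := by
  intro lines key value _
  unfold Spec_set_line_py
  rw [a_eq, b_eq]
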